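-- pv_equiv track=rewrite | github.com/Deeakpant9759/youtube-analytics-dashboard | src/dashboard/metrics.py | calculate_channel_metrics
-- ===== SOURCE A (Python) =====
-- from typing import Dict, List, Optional
--
-- def calculate_channel_metrics(channels: List[Dict]) -> Dict:
--     """
--     Calculate aggregate metrics from channels
--     """
--     if not channels:
--         return {
--             "total_channels": 0,
--             "total_subscribers": 0,
--             "total_views": 0,
--             "total_videos": 0
--         }
--
--     return {
--         "total_channels": len(channels),
--         "total_subscribers": sum(c.get("subscribers", 0) for c in channels),
--         "total_views": sum(c.get("views", 0) for c in channels),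
--         "total_videos": sum(c.get("total_videos", 0) for c in channels)
--     }
-- ===== SOURCE B (Python) =====
-- def calculate_channel_metrics(channels):
--     # Key-dispatch aggregation: walk each channel's items once and route each
--     # (key, value) pair into an accumulator dict, instead of running a keyed
--     # lookup/sum per wanted field.
--     totals = {"subscribers": 0, "views": 0, "total_videos": 0}
--     for c in channels:
--         for key, value in c.items():
--             if key in totals:
--                 totals[key] += value
--     return {
--         "total_channels": len(channels),
--         "total_subscribers": totals["subscribers"],
--         "total_views": totals["views"],
--         "total_videos": totals["total_videos"],
--     }
-- ===== Notes on version B (the rewrite author's own statement) =====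
-- stated objective: alternative
-- what changed: Instead of a per-field keyed sum (three generator scans doing c.get(field,0) per channel), B walks each channel's (key,value) items once and dispatches each pair by key into an accumulator dict, then reads the three accumulators; the empty-list guard disappears naturally.
import Mathlib
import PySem

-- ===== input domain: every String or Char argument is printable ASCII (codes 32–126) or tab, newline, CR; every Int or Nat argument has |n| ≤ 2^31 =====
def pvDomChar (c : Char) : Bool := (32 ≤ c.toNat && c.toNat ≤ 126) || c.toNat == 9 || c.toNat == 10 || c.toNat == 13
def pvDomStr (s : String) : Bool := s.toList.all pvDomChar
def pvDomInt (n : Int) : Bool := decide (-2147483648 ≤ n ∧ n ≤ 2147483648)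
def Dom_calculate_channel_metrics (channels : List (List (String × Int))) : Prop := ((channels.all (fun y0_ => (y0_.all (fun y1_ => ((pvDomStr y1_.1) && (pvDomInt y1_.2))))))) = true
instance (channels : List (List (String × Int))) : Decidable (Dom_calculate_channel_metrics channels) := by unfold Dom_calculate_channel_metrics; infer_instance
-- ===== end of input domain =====

-- B replaces A's three per-field keyed sums with one data-driven scan of each channel's items dispatching pairs by key into an accumulator dict (return value only).

-- ===== PORT A =====
def calculate_channel_metrics (channels : List (List (String × Int))) : List (String × Int) :=
  if channels = [] then
    [("total_channels", 0), ("total_subscribers", 0), ("total_views", 0), ("total_videos", 0)]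
  else
    [("total_channels", (channels.length : Int)),
     ("total_subscribers", (channels.map (fun c => (PySem.Dict.mk c).getD "subscribers" 0)).sum),
     ("total_views", (channels.map (fun c => (PySem.Dict.mk c).getD "views" 0)).sum),
     ("total_videos", (channels.map (fun c => (PySem.Dict.mk c).getD "total_videos" 0)).sum)]

-- ===== PORT B =====
-- 'for key, value in c.items(): if key in totals: totals[key] += value'.
-- A channel dict is represented as an assoc list with first-match lookup, so 'c.items()'
-- yields each key once with its first value; this is ported exactly by walking the raw
-- pairs with a 'seen' set that skips later duplicates of a key (exact: on a list without
-- duplicate keys the seen-set never fires and the walk is items() itself).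
def pvDispatchStep (st : PySem.Dict String Int × PySem.Set String) (p : String × Int) :
    PySem.Dict String Int × PySem.Set String :=
  if st.2.contains p.1 then st
  else ((if st.1.contains p.1 then st.1.modify p.1 0 (· + p.2) else st.1), st.2.add p.1)

def calculate_channel_metrics_alt (channels : List (List (String × Int))) : List (String × Int) :=
  let totals := channels.foldl
    (fun (totals : PySem.Dict String Int) c =>
      (c.foldl pvDispatchStep (totals, PySem.Set.ofList [])).1)
    (PySem.Dict.ofList [("subscribers", 0), ("views", 0), ("total_videos", 0)])
  [("total_channels", (channels.length : Int)),
   ("total_subscribers", totals.getD "subscribers" 0),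
   ("total_views", totals.getD "views" 0),
   ("total_videos", totals.getD "total_videos" 0)]

-- ===== PRECONDITION & SPEC =====
def Spec_calculate_channel_metrics (channels : List (List (String × Int))) (out : List (String × Int)) : Prop := out = calculate_channel_metrics_alt channels
instance (channels : List (List (String × Int))) (out : List (String × Int)) : Decidable (Spec_calculate_channel_metrics channels out) := by unfold Spec_calculate_channel_metrics; infer_instance

-- ===== CLAIM =====
def Claim_equal_calculate_channel_metrics : Prop := ∀ (channels : List (List (String × Int))), Dom_calculate_channel_metrics channels → Spec_calculate_channel_metrics channels (calculate_channel_metrics channels)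

-- ===== LEMMAS AND PROOFS =====


-- Set membership after add, as Bool.
theorem set_contains_add (s : PySem.Set String) (x y : String) :
    (s.add x).contains y = (s.contains y || (y == x)) := by
  simp [List.contains_eq_mem, PySem.Set.mem_add]
  by_cases h : y = x <;> simp [h]

-- The inner walk never changes which keys the accumulator holds.
theorem dispatch_contains (c : List (String × Int)) (d : PySem.Dict String Int)
    (seen : PySem.Set String) (j : String) :
    ((c.foldl pvDispatchStep (d, seen)).1.contains j = d.contains j) := by
  induction c generalizing d seen with
  | nil => rfl
  | cons p rest ih =>
    rw [List.foldl_cons]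
    by_cases hs : seen.contains p.1 = true
    · simp only [pvDispatchStep, hs, if_true]
      exact ih d seen
    · by_cases hd : d.contains p.1 = true
      · simp only [pvDispatchStep, hs, hd, if_true, Bool.false_eq_true, if_false]
        rw [ih, PySem.Dict.contains_modify]
        by_cases hj : j = p.1 <;> simp [hj, hd]
      · simp only [pvDispatchStep, hs, hd, Bool.false_eq_true, if_false]
        exact ih d _

-- The inner walk adds, for each contained key not yet marked seen, the channel
-- dict's first-match value (0 if the key is absent from the channel).
theorem dispatch_getD (c : List (String × Int)) (d : PySem.Dict String Int)
    (seen : PySem.Set String) (k : String) (hk : d.contains k = true) :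
    ((c.foldl pvDispatchStep (d, seen)).1.getD k 0
      = d.getD k 0 + (if seen.contains k then 0 else (PySem.Dict.mk c).getD k 0)) := by
  induction c generalizing d seen with
  | nil => simp [PySem.Dict.getD_eq_get?_getD, PySem.Dict.get?]
  | cons p rest ih =>
    obtain ⟨pk, pv⟩ := p
    rw [List.foldl_cons, PySem.Dict.getD_eq_get?_getD (PySem.Dict.mk ((pk, pv) :: rest)),
        PySem.Dict.get?_mk_cons]
    by_cases hs : seen.contains pk = true
    · simp only [pvDispatchStep, hs, if_true]
      rw [ih d seen hk]
      by_cases hsk : seen.contains k = true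
      · have hm : k ∈ seen := List.mem_of_elem_eq_true hsk
        simp [hm]
      · have hne : ¬ (pk == k) = true := fun h => hsk (by rw [← beq_iff_eq.mp h]; exact hs)
        simp [hne, PySem.Dict.getD_eq_get?_getD]
    · by_cases hd : d.contains pk = true
      · simp only [pvDispatchStep, hs, hd, if_true, Bool.false_eq_true, if_false]
        have hk' : (d.modify pk 0 (· + pv)).contains k = true := by
          rw [PySem.Dict.contains_modify]; simp [hk]
        rw [ih _ _ hk', PySem.Dict.getD_modify, set_contains_add]
        by_cases hkp : k = pk
        · subst hkp
          have hm : k ∉ seen := fun hmem => hs (List.elem_eq_true_of_mem hmem)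
          simp [hm]
        · have hne : ¬ (pk == k) = true := fun h => hkp (beq_iff_eq.mp h).symm
          have hne' : ¬ (k == pk) = true := fun h => hkp (beq_iff_eq.mp h)
          simp [hkp, hne, hne', PySem.Dict.getD_eq_get?_getD]
      · simp only [pvDispatchStep, hs, hd, Bool.false_eq_true, if_false]
        rw [ih d _ hk, set_contains_add]
        have hkp : ¬ k = pk := fun h => by rw [h] at hk; simp [hk] at hd
        have hne : ¬ (pk == k) = true := fun h => hkp (beq_iff_eq.mp h).symm
        have hne' : ¬ (k == pk) = true := fun h => hkp (beq_iff_eq.mp h)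
        simp [hne, hne', PySem.Dict.getD_eq_get?_getD]

-- The outer loop accumulates, for each key of the initial dict, the sum A computes.
theorem outer_getD (channels : List (List (String × Int))) (d : PySem.Dict String Int)
    (k : String) (hk : d.contains k = true) :
    ((channels.foldl (fun (t : PySem.Dict String Int) c =>
        (c.foldl pvDispatchStep (t, PySem.Set.ofList [])).1) d).getD k 0
      = d.getD k 0 + (channels.map (fun c => (PySem.Dict.mk c).getD k 0)).sum) := by
  induction channels generalizing d with
  | nil => simp
  | cons c rest ih =>
    have hc : ((c.foldl pvDispatchStep (d, PySem.Set.ofList [])).1).contains k = true := by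
      rw [dispatch_contains]; exact hk
    rw [List.foldl_cons, List.map_cons, List.sum_cons, ih _ hc,
        dispatch_getD c d _ k hk]
    simp [PySem.Set.ofList]
    ring

-- ===== VERDICT =====
theorem calculate_channel_metrics_spec : Claim_equal_calculate_channel_metrics := by
  intro channels _
  unfold Spec_calculate_channel_metrics calculate_channel_metrics calculate_channel_metrics_alt
  rcases channels with _ | ⟨c, rest⟩
  · decide
  · simp only [if_neg (by simp : ¬(c :: rest = []))]
    have h := fun k hk => outer_getD (c :: rest)
      (PySem.Dict.ofList [("subscribers", 0), ("views", 0), ("total_videos", 0)]) k hk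
    rw [h "subscribers" (by decide), h "views" (by decide), h "total_videos" (by decide)]
    simp
    refine ⟨by decide, by decide, by decide⟩
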